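-- pv_equiv track=rewrite | github.com/t-montes/PensuManager | pensumanager.py | colorMateria
-- ===== SOURCE A (Python) =====
-- def colorMateria(codigoMateria: str) -> str:
--     #if 'ISIS' in codigoMateria:
--     if any(i in codigoMateria for i in ['ISIS', 'MISW', 'MISO', 'MINE', 'MESI']):
--         return '#3CDFD5'
--     elif 'IELE' in codigoMateria:
--         return '#DDD539'
--     elif 'LENG' in codigoMateria:
--         return '#E187E2'
--     elif 'MATE' in codigoMateria:
--         return '#EF1010'
--     elif 'FISI' in codigoMateria or 'QUIM' in codigoMateria or 'IIND' in codigoMateria: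
--         return '#B0545F'
--     elif 'CB' in codigoMateria:
--         return '#9A62E3'
--     else:
--         return '#91EE89'
-- ===== SOURCE B (Python) =====
-- # Single left-to-right scan of the string: every pattern has length 2 or 4, so
-- # 'pattern in s' holds iff some fixed-width window of s equals the pattern.
-- # A hash map keyed by the exact window text gives (priority, color); we keep
-- # the hit with the smallest priority seen during the scan.
-- _PATTERNS = {
--     'ISIS': (0, '#3CDFD5'), 'MISW': (0, '#3CDFD5'), 'MISO': (0, '#3CDFD5'),
--     'MINE': (0, '#3CDFD5'), 'MESI': (0, '#3CDFD5'),
--     'IELE': (1, '#DDD539'),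
--     'LENG': (2, '#E187E2'),
--     'MATE': (3, '#EF1010'),
--     'FISI': (4, '#B0545F'), 'QUIM': (4, '#B0545F'), 'IIND': (4, '#B0545F'),
--     'CB':   (5, '#9A62E3'),
-- }
--
-- def colorMateria(codigoMateria: str) -> str:
--     best = (6, '#91EE89')
--     for i in range(len(codigoMateria)):
--         for width in (2, 4):
--             hit = _PATTERNS.get(codigoMateria[i:i + width])
--             if hit is not None and hit[0] < best[0]:
--                 best = hit
--     return best[1]
-- ===== Notes on version B (the rewrite author's own statement) =====
-- stated objective: alternative
-- what changed: Instead of testing each of the 12 substrings against the string separately, B makes a single left-to-right scan over the string's positions, looks each fixed-width (2/4) window up in a hash map keyed by the exact window text, and keeps the hit with the smallest priority; the default is returned when no window is a key.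
import Mathlib
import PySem

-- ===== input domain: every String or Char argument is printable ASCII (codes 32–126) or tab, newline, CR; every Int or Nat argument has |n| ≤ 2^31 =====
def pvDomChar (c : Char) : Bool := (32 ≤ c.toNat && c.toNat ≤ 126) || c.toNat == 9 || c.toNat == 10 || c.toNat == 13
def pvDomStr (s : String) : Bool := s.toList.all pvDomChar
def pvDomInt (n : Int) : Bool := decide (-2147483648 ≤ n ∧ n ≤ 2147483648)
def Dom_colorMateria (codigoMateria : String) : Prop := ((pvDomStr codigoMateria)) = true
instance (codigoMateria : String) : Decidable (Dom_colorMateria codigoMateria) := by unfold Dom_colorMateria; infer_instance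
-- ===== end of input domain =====

-- B replaces A's per-pattern substring tests by a single left-to-right scan of the string, looking each fixed-width window up in a hash map and keeping the smallest-priority hit (alternative algorithm, same cost).


-- ===== PORT A =====
def colorMateria (codigoMateria : String) : String :=
  if ["ISIS", "MISW", "MISO", "MINE", "MESI"].any (fun i => PySem.Str.isIn i codigoMateria) then
    "#3CDFD5"
  else if PySem.Str.isIn "IELE" codigoMateria then
    "#DDD539"
  else if PySem.Str.isIn "LENG" codigoMateria then
    "#E187E2"
  else if PySem.Str.isIn "MATE" codigoMateria then
    "#EF1010"
  else if PySem.Str.isIn "FISI" codigoMateria || PySem.Str.isIn "QUIM" codigoMateria || PySem.Str.isIn "IIND" codigoMateria then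
    "#B0545F"
  else if PySem.Str.isIn "CB" codigoMateria then
    "#9A62E3"
  else
    "#91EE89"

-- ===== PORT B =====
def pvPatterns : PySem.Dict String (Nat × String) :=
  PySem.Dict.ofList
  [ ("ISIS", (0, "#3CDFD5")), ("MISW", (0, "#3CDFD5")), ("MISO", (0, "#3CDFD5")),
    ("MINE", (0, "#3CDFD5")), ("MESI", (0, "#3CDFD5")),
    ("IELE", (1, "#DDD539")),
    ("LENG", (2, "#E187E2")),
    ("MATE", (3, "#EF1010")),
    ("FISI", (4, "#B0545F")), ("QUIM", (4, "#B0545F")), ("IIND", (4, "#B0545F")),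
    ("CB",   (5, "#9A62E3")) ]

def colorMateria_alt (codigoMateria : String) : String :=
  ((PySem.List.pyRange 0 ((PySem.Str.len codigoMateria : Int)) 1).foldl (fun best i =>
      ([2, 4] : List Int).foldl (fun best width =>
        match PySem.Dict.get? pvPatterns (PySem.Str.slice codigoMateria (some i) (some (i + width))) with
        | some hit => if hit.1 < best.1 then hit else best
        | none => best) best)
    (((6 : Nat), "#91EE89"))).2

-- ===== PRECONDITION & SPEC =====
def Spec_colorMateria (codigoMateria : String) (out : String) : Prop := out = colorMateria_alt codigoMateria
instance (codigoMateria : String) (out : String) : Decidable (Spec_colorMateria codigoMateria out) := by unfold Spec_colorMateria; infer_instance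

-- ===== CLAIM =====
def Claim_equal_colorMateria : Prop := ∀ (codigoMateria : String), Dom_colorMateria codigoMateria → Spec_colorMateria codigoMateria (colorMateria codigoMateria)


-- ===== LEMMAS AND PROOFS =====

-- proof-only helpers: the min-accumulator step, window extraction, and the table as a plain list
def pvF (b h : Nat × String) : Nat × String := if h.1 < b.1 then h else b

def pvWin (s : String) (i w : Int) : String := PySem.Str.slice s (some i) (some (i + w))

def pvPatList : List (String × (Nat × String)) :=
  [ ("ISIS", (0, "#3CDFD5")), ("MISW", (0, "#3CDFD5")), ("MISO", (0, "#3CDFD5")),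
    ("MINE", (0, "#3CDFD5")), ("MESI", (0, "#3CDFD5")),
    ("IELE", (1, "#DDD539")),
    ("LENG", (2, "#E187E2")),
    ("MATE", (3, "#EF1010")),
    ("FISI", (4, "#B0545F")), ("QUIM", (4, "#B0545F")), ("IIND", (4, "#B0545F")),
    ("CB",   (5, "#9A62E3")) ]

def pvHits (s : String) : List (Nat × String) :=
  (PySem.List.pyRange 0 ((PySem.Str.len s : Int)) 1).flatMap (fun i =>
    ([2, 4] : List Int).filterMap (fun w => PySem.Dict.get? pvPatterns (pvWin s i w)))

lemma pv_inner (s : String) (b : Nat × String) (i : Int) :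
    ([2, 4] : List Int).foldl (fun best width =>
      match PySem.Dict.get? pvPatterns (PySem.Str.slice s (some i) (some (i + width))) with
      | some hit => if hit.1 < best.1 then hit else best
      | none => best) b
    = (([2, 4] : List Int).filterMap (fun w => PySem.Dict.get? pvPatterns (pvWin s i w))).foldl pvF b := by
  simp only [List.foldl, List.filterMap, pvWin]
  cases h2 : PySem.Dict.get? pvPatterns (PySem.Str.slice s (some i) (some (i + 2))) <;>
    cases h4 : PySem.Dict.get? pvPatterns (PySem.Str.slice s (some i) (some (i + 4))) <;>
      simp [pvF, List.foldl]

lemma pv_outer (s : String) : ∀ (l : List Int) (b : Nat × String),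
    l.foldl (fun best i =>
      ([2, 4] : List Int).foldl (fun best width =>
        match PySem.Dict.get? pvPatterns (PySem.Str.slice s (some i) (some (i + width))) with
        | some hit => if hit.1 < best.1 then hit else best
        | none => best) best) b
    = (l.flatMap (fun i => ([2, 4] : List Int).filterMap
        (fun w => PySem.Dict.get? pvPatterns (pvWin s i w)))).foldl pvF b := by
  intro l
  induction l with
  | nil => intro b; simp
  | cons a l ih =>
      intro b
      rw [List.foldl_cons, ih, List.flatMap_cons, List.foldl_append, pv_inner]

lemma pv_alt_eq (s : String) :
    colorMateria_alt s = ((pvHits s).foldl pvF ((6 : Nat), "#91EE89")).2 := by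
  unfold colorMateria_alt pvHits
  rw [pv_outer]

lemma pv_foldl_mem : ∀ (l : List (Nat × String)) (b), l.foldl pvF b = b ∨ l.foldl pvF b ∈ l := by
  intro l
  induction l with
  | nil => intro b; left; rfl
  | cons a l ih =>
      intro b
      rw [List.foldl_cons]
      rcases ih (pvF b a) with h | h
      · rw [h]; unfold pvF; split_ifs
        · right; simp
        · left; rfl
      · right; simp [h]

lemma pv_pvF_fst_le_left (b h : Nat × String) : (pvF b h).1 ≤ b.1 := by
  unfold pvF; split_ifs with hlt <;> omega

lemma pv_pvF_fst_le_right (b h : Nat × String) : (pvF b h).1 ≤ h.1 := by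
  unfold pvF; split_ifs with hlt <;> omega

lemma pv_foldl_fst_le_init : ∀ (l : List (Nat × String)) (b), (l.foldl pvF b).1 ≤ b.1 := by
  intro l
  induction l with
  | nil => intro b; exact le_refl _
  | cons a l ih =>
      intro b
      rw [List.foldl_cons]
      exact le_trans (ih (pvF b a)) (pv_pvF_fst_le_left b a)

lemma pv_foldl_fst_le : ∀ (l : List (Nat × String)) (b) (h : Nat × String),
    h ∈ l → (l.foldl pvF b).1 ≤ h.1 := by
  intro l
  induction l with
  | nil => intro b h hm; simp at hm
  | cons a l ih =>
      intro b h hm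
      rw [List.foldl_cons]
      rcases List.mem_cons.mp hm with rfl | hm
      · exact le_trans (pv_foldl_fst_le_init l (pvF b h)) (pv_pvF_fst_le_right b h)
      · exact ih (pvF b a) h hm

lemma pv_get?_mk_mem {l : List (String × (Nat × String))} {t : String} {h : Nat × String}
    (hg : (PySem.Dict.mk l).get? t = some h) : (t, h) ∈ l := by
  induction l with
  | nil => simp [PySem.Dict.get?] at hg
  | cons a l ih =>
      rw [show (PySem.Dict.mk (a :: l)) = PySem.Dict.mk ((a.1, a.2) :: l) by rfl,
          PySem.Dict.get?_mk_cons] at hg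
      by_cases hk : a.1 == t
      · rw [if_pos hk] at hg
        have : t = a.1 := (beq_iff_eq.mp hk).symm
        subst this
        injection hg with hg
        subst hg
        simp
      · rw [if_neg hk] at hg
        exact List.mem_cons_of_mem _ (ih hg)

lemma pv_patterns_eq : pvPatterns = PySem.Dict.mk pvPatList := by decide

lemma pv_get?_mem {t : String} {h : Nat × String}
    (hg : PySem.Dict.get? pvPatterns t = some h) : (t, h) ∈ pvPatList := by
  rw [pv_patterns_eq] at hg
  exact pv_get?_mk_mem hg

lemma pv_get?_key : ∀ p ∈ pvPatList, PySem.Dict.get? pvPatterns p.1 = some p.2 := by decide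

-- window = pattern at some scan position  iff  pattern occurs as a substring
lemma pv_winmatch (s : String) (p : String) (hne : p.toList ≠ [])
    (hw : ((p.toList.length : Int)) ∈ ([2, 4] : List Int)) :
    (∃ i : Int, (0 ≤ i ∧ i < (s.toList.length : Int)) ∧
       ∃ w ∈ ([2, 4] : List Int), pvWin s i w = p) ↔ PySem.Str.isIn p s = true := by
  constructor
  · rintro ⟨i, ⟨h0, hn⟩, w, hwm, he⟩
    rw [PySem.Str.isIn_iff_infix]
    have hj : i = ((i.toNat : Nat) : Int) := by omega
    have hw24 : w = 2 ∨ w = 4 := by simpa using hwm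
    have hwn : ∃ wn : Nat, w = (wn : Int) := by
      rcases hw24 with h | h
      · exact ⟨2, by omega⟩
      · exact ⟨4, by omega⟩
    rcases hwn with ⟨wn, rfl⟩
    have he' : (pvWin s i (wn : Int)).toList = p.toList := by rw [he]
    rw [pvWin, PySem.Str.toList_slice, PySem.Chars.slice_eq_listSlice, hj,
        PySem.List.slice_natCast_add] at he'
    have hpre : p.toList <+: s.toList.drop i.toNat := by
      rw [← he']; exact List.take_prefix _ _
    obtain ⟨t, ht⟩ := hpre
    exact ⟨s.toList.take i.toNat, t, by rw [List.append_assoc, ht, List.take_append_drop]⟩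
  · intro hin
    rw [PySem.Str.isIn_iff_infix] at hin
    obtain ⟨u, t, hut⟩ := hin
    refine ⟨(u.length : Int), ⟨by omega, ?_⟩, (p.toList.length : Int), hw, ?_⟩
    · have hlen : s.toList.length = u.length + p.toList.length + t.length := by
        rw [← hut]; simp; omega
      have hp : 0 < p.toList.length := List.length_pos_of_ne_nil hne
      omega
    · rw [← String.toList_inj, pvWin, PySem.Str.toList_slice, PySem.Chars.slice_eq_listSlice,
          PySem.List.slice_natCast_add]
      have hd : s.toList.drop u.length = p.toList ++ t := by
        rw [← hut, List.append_assoc, List.drop_left]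
      rw [hd, List.take_left]

lemma pv_mem_pvHits_iff (s : String) (h : Nat × String) :
    h ∈ pvHits s ↔ ∃ p, (p, h) ∈ pvPatList ∧ PySem.Str.isIn p s = true := by
  constructor
  · intro hm
    simp only [pvHits, List.mem_flatMap, List.mem_filterMap, PySem.List.mem_pyRange_one] at hm
    obtain ⟨i, ⟨h0, hn⟩, w, hwm, hg⟩ := hm
    have hmem : (pvWin s i w, h) ∈ pvPatList := pv_get?_mem hg
    refine ⟨pvWin s i w, hmem, ?_⟩
    have hn' : i < (s.toList.length : Int) := by rwa [PySem.Str.len_eq] at hn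
    have hne : (pvWin s i w).toList ≠ [] ∧ (((pvWin s i w).toList.length : Int)) ∈ ([2, 4] : List Int) := by
      simp only [pvPatList, List.mem_cons, List.not_mem_nil, or_false, Prod.mk.injEq] at hmem
      rcases hmem with h1|h1|h1|h1|h1|h1|h1|h1|h1|h1|h1|h1 <;>
        (rw [h1.1]; exact ⟨by decide, by decide⟩)
    exact (pv_winmatch s _ hne.1 hne.2).mp ⟨i, ⟨h0, hn'⟩, w, hwm, rfl⟩
  · rintro ⟨p, hmem, hin⟩
    have hne : p.toList ≠ [] ∧ ((p.toList.length : Int)) ∈ ([2, 4] : List Int) := by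
      simp only [pvPatList, List.mem_cons, List.not_mem_nil, or_false, Prod.mk.injEq] at hmem
      rcases hmem with h1|h1|h1|h1|h1|h1|h1|h1|h1|h1|h1|h1 <;>
        (rw [h1.1]; exact ⟨by decide, by decide⟩)
    obtain ⟨i, ⟨h0, hn⟩, w, hwm, he⟩ := (pv_winmatch s p hne.1 hne.2).mpr hin
    simp only [pvHits, List.mem_flatMap, List.mem_filterMap, PySem.List.mem_pyRange_one]
    refine ⟨i, ⟨h0, by rwa [PySem.Str.len_eq]⟩, w, hwm, ?_⟩
    rw [he]
    exact pv_get?_key (p, h) hmem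

-- ===== VERDICT =====
theorem colorMateria_spec : Claim_equal_colorMateria := by
  intro s _
  unfold Spec_colorMateria colorMateria
  rw [pv_alt_eq]
  have hiff := pv_mem_pvHits_iff s
  have g0 : (((0 : Nat), "#3CDFD5") ∈ pvHits s) ↔
      (["ISIS", "MISW", "MISO", "MINE", "MESI"].any (fun i => PySem.Str.isIn i s) = true) := by
    rw [hiff]; simp [pvPatList]
  have g1 : (((1 : Nat), "#DDD539") ∈ pvHits s) ↔ PySem.Str.isIn "IELE" s = true := by
    rw [hiff]; simp [pvPatList]
  have g2 : (((2 : Nat), "#E187E2") ∈ pvHits s) ↔ PySem.Str.isIn "LENG" s = true := by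
    rw [hiff]; simp [pvPatList]
  have g3 : (((3 : Nat), "#EF1010") ∈ pvHits s) ↔ PySem.Str.isIn "MATE" s = true := by
    rw [hiff]; simp [pvPatList]
  have g4 : (((4 : Nat), "#B0545F") ∈ pvHits s) ↔
      ((PySem.Str.isIn "FISI" s || PySem.Str.isIn "QUIM" s || PySem.Str.isIn "IIND" s) = true) := by
    rw [hiff]; simp [pvPatList]; rw [or_assoc]
  have g5 : (((5 : Nat), "#9A62E3") ∈ pvHits s) ↔ PySem.Str.isIn "CB" s = true := by
    rw [hiff]; simp [pvPatList]
  have hpairs : ∀ h ∈ pvHits s, h = ((0 : Nat), "#3CDFD5") ∨ h = ((1 : Nat), "#DDD539") ∨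
      h = ((2 : Nat), "#E187E2") ∨ h = ((3 : Nat), "#EF1010") ∨ h = ((4 : Nat), "#B0545F") ∨
      h = ((5 : Nat), "#9A62E3") := by
    intro h hm
    rcases (hiff h).mp hm with ⟨p, hp, _⟩
    simp only [pvPatList, List.mem_cons, List.not_mem_nil, or_false, Prod.mk.injEq] at hp
    rcases hp with h1|h1|h1|h1|h1|h1|h1|h1|h1|h1|h1|h1 <;> simp [h1.2]
  have hmem := pv_foldl_mem (pvHits s) ((6 : Nat), "#91EE89")
  have hle : ∀ h ∈ pvHits s, ((pvHits s).foldl pvF ((6 : Nat), "#91EE89")).1 ≤ h.1 :=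
    fun h hm => pv_foldl_fst_le _ _ h hm
  split_ifs with c0 c1 c2 c3 c4 c5
  · have h0 : ((0 : Nat), "#3CDFD5") ∈ pvHits s := g0.mpr c0
    have hlek := hle _ h0
    rcases hmem with he | hm
    · rw [he] at hlek; simp at hlek
    · rcases hpairs _ hm with h1|h1|h1|h1|h1|h1 <;> rw [h1] at hlek ⊢ <;> revert hlek <;> decide
  · have h0 : ((1 : Nat), "#DDD539") ∈ pvHits s := g1.mpr c1
    have hlek := hle _ h0
    rcases hmem with he | hm
    · rw [he] at hlek; simp at hlek
    · rcases hpairs _ hm with h1|h1|h1|h1|h1|h1 <;> rw [h1] at hlek hm ⊢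
      · exact absurd (g0.mp hm) c0
      all_goals revert hlek; decide
  · have h0 : ((2 : Nat), "#E187E2") ∈ pvHits s := g2.mpr c2
    have hlek := hle _ h0
    rcases hmem with he | hm
    · rw [he] at hlek; simp at hlek
    · rcases hpairs _ hm with h1|h1|h1|h1|h1|h1 <;> rw [h1] at hlek hm ⊢
      · exact absurd (g0.mp hm) c0
      · exact absurd (g1.mp hm) c1
      all_goals revert hlek; decide
  · have h0 : ((3 : Nat), "#EF1010") ∈ pvHits s := g3.mpr c3
    have hlek := hle _ h0
    rcases hmem with he | hm
    · rw [he] at hlek; simp at hlek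
    · rcases hpairs _ hm with h1|h1|h1|h1|h1|h1 <;> rw [h1] at hlek hm ⊢
      · exact absurd (g0.mp hm) c0
      · exact absurd (g1.mp hm) c1
      · exact absurd (g2.mp hm) c2
      all_goals revert hlek; decide
  · have h0 : ((4 : Nat), "#B0545F") ∈ pvHits s := g4.mpr c4
    have hlek := hle _ h0
    rcases hmem with he | hm
    · rw [he] at hlek; simp at hlek
    · rcases hpairs _ hm with h1|h1|h1|h1|h1|h1 <;> rw [h1] at hlek hm ⊢
      · exact absurd (g0.mp hm) c0
      · exact absurd (g1.mp hm) c1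
      · exact absurd (g2.mp hm) c2
      · exact absurd (g3.mp hm) c3
      all_goals revert hlek; decide
  · have h0 : ((5 : Nat), "#9A62E3") ∈ pvHits s := g5.mpr c5
    have hlek := hle _ h0
    rcases hmem with he | hm
    · rw [he] at hlek; simp at hlek
    · rcases hpairs _ hm with h1|h1|h1|h1|h1|h1 <;> rw [h1] at hlek hm ⊢
      · exact absurd (g0.mp hm) c0
      · exact absurd (g1.mp hm) c1
      · exact absurd (g2.mp hm) c2
      · exact absurd (g3.mp hm) c3
      · exact absurd (g4.mp hm) c4
  · rcases hmem with he | hm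
    · rw [he]
    · exfalso
      rcases hpairs _ hm with h1|h1|h1|h1|h1|h1 <;> rw [h1] at hm
      · exact absurd (g0.mp hm) c0
      · exact absurd (g1.mp hm) c1
      · exact absurd (g2.mp hm) c2
      · exact absurd (g3.mp hm) c3
      · exact absurd (g4.mp hm) c4
      · exact absurd (g5.mp hm) c5
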